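-- pv_equiv track=rewrite | github.com/ZITAIQIU/GraphHAM | metapath.py | enum_longest_metapath_index
-- ===== SOURCE A (Python) =====
-- def enum_longest_metapath_index(name_dict, type_dict, length):
--     # Enumerate the longest metapath number list
--     hop = []
--     for type in type_dict.keys():
--         hop.append([type])
--     for i in range(length - 2):
--         new_hop = []
--         for path in hop:
--             for next_type in type_dict[path[-1]]:
--                 new_hop.append(path + [next_type])
--         hop = new_hop
--     return hop
-- ===== SOURCE B (Python) =====
-- def enum_longest_metapath_index(name_dict, type_dict, length):
--     # DP on suffixes grouped by start type, building paths front-to-back,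
--     # instead of expanding a single BFS frontier level by level.
--     if length <= 2:
--         return [[t] for t in type_dict]
--     suffix = {t: [[t, u] for u in type_dict[t]] for t in type_dict}
--     for _ in range(length - 3):
--         suffix = {t: [[t] + rest for u in type_dict[t] for rest in suffix[u]]
--                   for t in type_dict}
--     return [path for t in type_dict for path in suffix[t]]
-- ===== Notes on version B (the rewrite author's own statement) =====
-- stated objective: alternative
-- what changed: Replaced the level-by-level BFS frontier (extending every current path at its tail into one flat new_hop list) by a dynamic program on suffixes keyed by start type, building each path front-to-back with a dict comprehension per level and concatenating the per-key lists at the end.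
import Mathlib
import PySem

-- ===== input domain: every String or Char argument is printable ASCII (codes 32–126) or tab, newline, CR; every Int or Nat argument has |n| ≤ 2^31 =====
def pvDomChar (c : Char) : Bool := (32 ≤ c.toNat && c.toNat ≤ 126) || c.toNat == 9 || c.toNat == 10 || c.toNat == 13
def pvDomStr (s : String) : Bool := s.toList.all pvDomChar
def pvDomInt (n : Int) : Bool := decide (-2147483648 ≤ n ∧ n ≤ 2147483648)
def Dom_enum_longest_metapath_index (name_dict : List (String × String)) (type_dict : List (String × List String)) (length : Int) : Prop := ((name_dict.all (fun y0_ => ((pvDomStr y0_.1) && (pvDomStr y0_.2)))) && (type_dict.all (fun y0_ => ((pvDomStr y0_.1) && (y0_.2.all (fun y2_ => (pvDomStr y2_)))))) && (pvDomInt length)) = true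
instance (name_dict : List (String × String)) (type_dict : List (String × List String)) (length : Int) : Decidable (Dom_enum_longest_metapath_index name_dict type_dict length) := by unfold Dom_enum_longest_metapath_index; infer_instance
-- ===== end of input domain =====

-- B replaces A's level-by-level BFS frontier (extending every path at its tail) by a suffix DP keyed
-- by start type, building paths front-to-back and concatenating per key; same cost, alternative shape.

-- ===== PORT A =====
-- one BFS level of A: for path in hop: for next_type in type_dict[path[-1]]: new_hop.append(path + [next_type])
-- (the lookup type_dict[path[-1]] is ported as getD with default []; Pre_ excludes the KeyError inputs)
def pvStepA (d : PySem.Dict String (List String)) (hop : List (List String)) : List (List String) :=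
  hop.foldl (fun nh path =>
    (d.getD ((PySem.List.pyGet? path (-1)).getD "") []).foldl (fun nh2 t => nh2 ++ [path ++ [t]]) nh) []

def enum_longest_metapath_index (name_dict : List (String × String)) (type_dict : List (String × List String)) (length : Int) : List (List String) :=
  let d := PySem.Dict.ofList type_dict
  let hop := d.keys.foldl (fun acc t => acc ++ [[t]]) []
  (PySem.List.pyRange 0 (length - 2) 1).foldl (fun hop _ => pvStepA d hop) hop

-- ===== PORT B =====
-- suffix = {t: [[t, u] for u in type_dict[t]] for t in type_dict}
def pvBaseB (d : PySem.Dict String (List String)) : PySem.Dict String (List (List String)) :=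
  d.keys.foldl (fun s t => s.insert t ((d.getD t []).map (fun u => [t, u]))) PySem.Dict.empty

-- suffix = {t: [[t] + rest for u in type_dict[t] for rest in suffix[u]] for t in type_dict}
-- (suffix[u] ported as getD with default []; Pre_ excludes the KeyError inputs)
def pvStepB (d : PySem.Dict String (List String)) (s : PySem.Dict String (List (List String))) : PySem.Dict String (List (List String)) :=
  d.keys.foldl (fun s' t =>
    s'.insert t ((d.getD t []).flatMap (fun u => (s.getD u []).map (fun rest => t :: rest)))) PySem.Dict.empty

def enum_longest_metapath_index_alt (name_dict : List (String × String)) (type_dict : List (String × List String)) (length : Int) : List (List String) :=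
  let d := PySem.Dict.ofList type_dict
  if length ≤ 2 then d.keys.map (fun t => [t])
  else
    let fin := (PySem.List.pyRange 0 (length - 3) 1).foldl (fun s _ => pvStepB d s) (pvBaseB d)
    d.keys.flatMap (fun t => fin.getD t [])

-- ===== PRECONDITION & SPEC =====
-- Pre_ excludes exactly the inputs where the Python A raises KeyError: length ≥ 4 together with some
-- successor type that is not itself a key of type_dict (the Python B raises there too).
def Pre_enum_longest_metapath_index (name_dict : List (String × String)) (type_dict : List (String × List String)) (length : Int) : Prop :=
  length ≤ 3 ∨ ∀ k ∈ (PySem.Dict.ofList type_dict).keys,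
    ∀ v ∈ (PySem.Dict.ofList type_dict).getD k [], v ∈ (PySem.Dict.ofList type_dict).keys
instance (name_dict : List (String × String)) (type_dict : List (String × List String)) (length : Int) : Decidable (Pre_enum_longest_metapath_index name_dict type_dict length) := by unfold Pre_enum_longest_metapath_index; infer_instance

def pvWitness_enum_longest_metapath_index : (List (String × String)) × (List (String × List String)) × Int :=
  ([], [("A", ["P"]), ("P", ["A"])], 4)

def Spec_enum_longest_metapath_index (name_dict : List (String × String)) (type_dict : List (String × List String)) (length : Int) (out : List (List String)) : Prop := out = enum_longest_metapath_index_alt name_dict type_dict length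
instance (name_dict : List (String × String)) (type_dict : List (String × List String)) (length : Int) (out : List (List String)) : Decidable (Spec_enum_longest_metapath_index name_dict type_dict length out) := by unfold Spec_enum_longest_metapath_index; infer_instance

-- ===== CLAIM (what is proved, stated in full; the proofs are below) =====
def Claim_equal_enum_longest_metapath_index : Prop := ∀ (name_dict : List (String × String)) (type_dict : List (String × List String)) (length : Int), Dom_enum_longest_metapath_index name_dict type_dict length → Pre_enum_longest_metapath_index name_dict type_dict length → Spec_enum_longest_metapath_index name_dict type_dict length (enum_longest_metapath_index name_dict type_dict length)

-- ===== LEMMAS AND PROOFS =====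

-- suffix lists of depth n continuing a path whose last element is t (the head of each suffix included)
def pvG (d : PySem.Dict String (List String)) : Nat → String → List (List String)
  | 0, _ => [[]]
  | (k+1), t => (d.getD t []).flatMap (fun u => (pvG d k u).map (fun q => u :: q))

-- B's per-type suffix table contents, as a function of the loop counter
def pvSL (d : PySem.Dict String (List String)) : Nat → String → List (List String)
  | 0, t => (d.getD t []).map (fun u => [t, u])
  | (j+1), t => (d.getD t []).flatMap (fun u => (pvSL d j u).map (fun rest => t :: rest))

theorem pvLast_append (p : List String) (u : String) :
    ((PySem.List.pyGet? (p ++ [u]) (-1)).getD "") = u := by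
  rw [PySem.List.pyGet?_neg_one_append_singleton]; rfl

theorem pvFoldl_const {α β : Type} (f : α → α) : ∀ (l : List β) (x : α),
    l.foldl (fun h _ => f h) x = f^[l.length] x := by
  intro l; induction l with
  | nil => intro x; rfl
  | cons b l ih => intro x; simp [List.foldl_cons, ih, Function.iterate_succ_apply]

theorem pvStepA_eq (d : PySem.Dict String (List String)) (hop : List (List String)) :
    pvStepA d hop = hop.flatMap (fun p =>
      (d.getD ((PySem.List.pyGet? p (-1)).getD "") []).map (fun u => p ++ [u])) := by
  unfold pvStepA
  simp only [PySem.List.foldl_append_singleton_eq_map, PySem.List.foldl_append_eq_flatMap,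
    List.nil_append]

theorem pvIterA (d : PySem.Dict String (List String)) : ∀ (n : Nat) (hop : List (List String)),
    (pvStepA d)^[n] hop = hop.flatMap (fun p =>
      (pvG d n ((PySem.List.pyGet? p (-1)).getD "")).map (fun q => p ++ q)) := by
  intro n; induction n with
  | zero => intro hop; simp [pvG]
  | succ n ih =>
    intro hop
    rw [Function.iterate_succ_apply, pvStepA_eq, ih]
    rw [List.flatMap_assoc]
    refine List.flatMap_congr ?_
    intro p _
    simp only [pvG, List.flatMap_map, List.map_flatMap, List.map_map]
    refine List.flatMap_congr ?_
    intro u _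
    rw [pvLast_append]
    refine List.map_congr_left ?_
    intro q _
    simp

theorem pvGetD_build (ks : List String) (hnd : ks.Nodup) (f : String → List (List String)) (u : String) :
    ((ks.foldl (fun s t => s.insert t (f t)) PySem.Dict.empty).getD u []) =
      if u ∈ ks then f u else [] := by
  have hit := PySem.Dict.items_foldl_insert_fresh (l := ks) (k := fun a => a) (v := f)
    (d := PySem.Dict.empty) (by intro a _; simp) (by simpa using hnd)
  have hempty : (PySem.Dict.empty : PySem.Dict String (List (List String))).items = [] := rfl
  have hkeys : (ks.foldl (fun s t => s.insert t (f t)) PySem.Dict.empty).keys = ks := by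
    show (ks.foldl (fun s t => s.insert t (f t)) PySem.Dict.empty).items.map (·.1) = ks
    rw [hit, hempty]
    have hcomp : ((fun x : String × List (List String) => x.1) ∘ fun a => (a, f a)) = id := rfl
    rw [List.nil_append, List.map_map, hcomp, List.map_id]
  by_cases hu : u ∈ ks
  · have hmem : (u, f u) ∈ (ks.foldl (fun s t => s.insert t (f t)) PySem.Dict.empty).items := by
      rw [hit, hempty]
      simp only [List.nil_append, List.mem_map]
      exact ⟨u, hu, rfl⟩
    rw [PySem.Dict.getD_of_mem_items _ hmem (by rw [hkeys]; exact hnd)]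
    simp [hu]
  · have h0 : (ks.foldl (fun s t => s.insert t (f t)) PySem.Dict.empty).get? u = none := by
      rw [PySem.Dict.get?_eq_none_iff_not_mem_keys, hkeys]; exact hu
    simp [PySem.Dict.getD, h0, hu]

theorem pvSux_nonkey (d : PySem.Dict String (List String)) (u : String) (hu : u ∉ d.keys) :
    d.getD u [] = [] := by
  have h0 : d.get? u = none := by rw [PySem.Dict.get?_eq_none_iff_not_mem_keys]; exact hu
  simp [PySem.Dict.getD, h0]

theorem pvSL_eq_G (d : PySem.Dict String (List String)) : ∀ (j : Nat) (t : String),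
    pvSL d j t = (pvG d (j+1) t).map (fun q => t :: q) := by
  intro j; induction j with
  | zero =>
    intro t
    simp only [pvSL, pvG, List.map_flatMap, List.map_cons, List.map_nil]
    rw [← List.map_eq_flatMap]
  | succ j ih =>
    intro t
    simp only [pvSL, pvG, ih, List.map_flatMap, List.map_map]

theorem pvBaseB_getD (d : PySem.Dict String (List String)) (hnd : d.keys.Nodup) (u : String) :
    (pvBaseB d).getD u [] = if u ∈ d.keys then (d.getD u []).map (fun v => [u, v]) else [] := by
  unfold pvBaseB
  rw [pvGetD_build d.keys hnd]

theorem pvStepB_getD (d : PySem.Dict String (List String)) (hnd : d.keys.Nodup)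
    (s : PySem.Dict String (List (List String))) (u : String) :
    (pvStepB d s).getD u [] =
      if u ∈ d.keys then (d.getD u []).flatMap (fun v => (s.getD v []).map (fun rest => u :: rest))
      else [] := by
  unfold pvStepB
  rw [pvGetD_build d.keys hnd]

theorem pvIterB (d : PySem.Dict String (List String)) (hnd : d.keys.Nodup) :
    ∀ (j : Nat) (u : String), ((pvStepB d)^[j] (pvBaseB d)).getD u [] = pvSL d j u := by
  intro j; induction j with
  | zero =>
    intro u
    rw [Function.iterate_zero_apply, pvBaseB_getD d hnd]
    by_cases hu : u ∈ d.keys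
    · simp [hu, pvSL]
    · simp [hu, pvSL, pvSux_nonkey d u hu]
  | succ j ih =>
    intro u
    rw [Function.iterate_succ_apply', pvStepB_getD d hnd]
    by_cases hu : u ∈ d.keys
    · simp only [hu, if_true, pvSL]
      congr 1; funext v; rw [ih]
    · simp [hu, pvSL, pvSux_nonkey d u hu]

theorem pvLast_single (t : String) : ((PySem.List.pyGet? [t] (-1)).getD "") = t := by
  have := pvLast_append [] t
  simpa using this

-- ===== VERDICT (by name: the statement is the Claim_ definition above) =====
theorem enum_longest_metapath_index_spec : Claim_equal_enum_longest_metapath_index := by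
  intro name_dict type_dict length _ _
  unfold Spec_enum_longest_metapath_index enum_longest_metapath_index enum_longest_metapath_index_alt
  set d := PySem.Dict.ofList type_dict with hd
  have hnd : d.keys.Nodup := PySem.Dict.nodup_keys_ofList type_dict
  simp only [PySem.List.foldl_append_singleton_eq_map, List.nil_append]
  rw [pvFoldl_const (pvStepA d), PySem.List.length_pyRange_one]
  by_cases hle : length ≤ 2
  · rw [if_pos hle]
    have : (length - 2 - 0).toNat = 0 := by omega
    rw [this]
    rfl
  · rw [if_neg hle]
    rw [pvFoldl_const (pvStepB d), PySem.List.length_pyRange_one]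
    have hm : (length - 2 - 0).toNat = (length - 3 - 0).toNat + 1 := by omega
    rw [hm, pvIterA]
    simp only [List.flatMap_map]
    calc (d.keys.flatMap fun t =>
            (pvG d ((length - 3 - 0).toNat + 1) ((PySem.List.pyGet? [t] (-1)).getD "")).map
              (fun q => [t] ++ q))
        = d.keys.flatMap fun t => pvSL d (length - 3 - 0).toNat t := by
          refine List.flatMap_congr ?_
          intro t _
          rw [pvLast_single, pvSL_eq_G]
          simp
      _ = d.keys.flatMap fun t =>
            ((pvStepB d)^[(length - 3 - 0).toNat] (pvBaseB d)).getD t [] := by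
          refine List.flatMap_congr ?_
          intro t _
          rw [pvIterB d hnd]
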